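-- pv_equiv track=rewrite | github.com/afontana1/Data-Engineering | Algorithms & Data Structures/code_samples/increasing_subarrays.py | find_monotonically_increasing_subsequences
-- ===== SOURCE A (Python) =====
-- def find_monotonically_increasing_subsequences(lst):
--     subsequences = []
--     current_subsequence = [lst[0]]
--
--     for i in range(1, len(lst)):
--         if lst[i] > current_subsequence[-1]:
--             current_subsequence.append(lst[i])
--         else:
--             if len(current_subsequence) > 1:
--                 subsequences.append(current_subsequence)
--             current_subsequence = [lst[i]]
--
--     if len(current_subsequence) > 1:
--         subsequences.append(current_subsequence)
--
--     return subsequences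
-- ===== SOURCE B (Python) =====
-- def find_monotonically_increasing_subsequences(lst):
--     n = len(lst)
--     breaks = [i for i in range(1, n) if lst[i] <= lst[i - 1]]
--     bounds = [0] + breaks + [n]
--     return [lst[a:b] for a, b in zip(bounds, bounds[1:]) if b - a > 1]
-- ===== Notes on version B (the rewrite author's own statement) =====
-- stated objective: alternative
-- what changed: Replaces A's online grow-a-run accumulator loop with a two-pass boundary decomposition: compute the break indices where lst[i] <= lst[i-1], form cut bounds [0]+breaks+[n], and slice out the segments of length > 1.
import Mathlib
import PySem

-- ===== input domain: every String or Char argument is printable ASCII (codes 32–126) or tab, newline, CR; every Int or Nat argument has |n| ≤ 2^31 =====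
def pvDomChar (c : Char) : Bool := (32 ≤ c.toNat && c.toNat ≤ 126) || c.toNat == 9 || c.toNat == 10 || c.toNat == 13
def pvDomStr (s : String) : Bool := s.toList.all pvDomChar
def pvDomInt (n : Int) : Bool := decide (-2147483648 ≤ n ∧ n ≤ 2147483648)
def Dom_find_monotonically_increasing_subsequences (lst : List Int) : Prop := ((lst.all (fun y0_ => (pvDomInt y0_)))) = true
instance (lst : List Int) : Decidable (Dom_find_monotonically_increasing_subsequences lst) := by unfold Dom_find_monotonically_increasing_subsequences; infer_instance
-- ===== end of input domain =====

-- B replaces A's online run-accumulator with a break-index pass plus a slicing pass (alternative decomposition, same cost); on the empty list A raises IndexError while B returns an empty result.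


-- ===== PORT A =====
-- final flush of A: append current_subsequence if it has length > 1
def pvFinA (st : List (List Int) × List Int) : List (List Int) :=
  if 1 < st.2.length then st.1 ++ [st.2] else st.1

-- one loop iteration of A: state = (subsequences, current_subsequence), x = lst[i]
def pvStepA (st : List (List Int) × List Int) (x : Int) : List (List Int) × List Int :=
  if PySem.List.pyGetD st.2 (-1) 0 < x then (st.1, st.2 ++ [x])
  else if 1 < st.2.length then (st.1 ++ [st.2], [x])
  else (st.1, [x])

def find_monotonically_increasing_subsequences (lst : List Int) : List (List Int) :=
  -- reading the first element raises IndexError on an empty list; Pre_ excludes it, so the default is never read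
  pvFinA ((PySem.List.pyRange 1 (PySem.List.len lst) 1).foldl
      (fun st i => pvStepA st (PySem.List.pyGetD lst i 0))
      ([], [PySem.List.pyGetD lst 0 0]))

-- ===== PORT B =====
def find_monotonically_increasing_subsequences_alt (lst : List Int) : List (List Int) :=
  let n : Int := PySem.List.len lst
  let breaks := (PySem.List.pyRange 1 n 1).filter
      (fun i => PySem.List.pyGetD lst i 0 ≤ PySem.List.pyGetD lst (i - 1) 0)
  let bounds := 0 :: (breaks ++ [n])
  ((bounds.zip bounds.tail).filter (fun p => 1 < p.2 - p.1)).map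
    (fun p => PySem.List.slice lst (some p.1) (some p.2))

-- ===== PRECONDITION & SPEC =====
-- Pre_ excludes exactly the empty list, on which A raises IndexError reading the first element.
def Pre_find_monotonically_increasing_subsequences (lst : List Int) : Prop := lst ≠ []
instance (lst : List Int) : Decidable (Pre_find_monotonically_increasing_subsequences lst) := by unfold Pre_find_monotonically_increasing_subsequences; infer_instance
def pvWitness_find_monotonically_increasing_subsequences : List Int := [1, 2, 1, 3]

def Spec_find_monotonically_increasing_subsequences (lst : List Int) (out : List (List Int)) : Prop := out = find_monotonically_increasing_subsequences_alt lst
instance (lst : List Int) (out : List (List Int)) : Decidable (Spec_find_monotonically_increasing_subsequences lst out) := by unfold Spec_find_monotonically_increasing_subsequences; infer_instance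

-- ===== CLAIM (what is proved, stated in full; the proofs are below) =====
def Claim_equal_find_monotonically_increasing_subsequences : Prop := ∀ (lst : List Int), Dom_find_monotonically_increasing_subsequences lst → Pre_find_monotonically_increasing_subsequences lst → Spec_find_monotonically_increasing_subsequences lst (find_monotonically_increasing_subsequences lst)
-- ===== LEMMAS AND PROOFS =====

-- reference: maximal strictly increasing runs, keeping those of length > 1
def pvRuns (prev : Int) (cur : List Int) : List Int → List (List Int)
  | [] => if 1 < cur.length then [cur] else []
  | x :: xs =>
    if prev < x then pvRuns x (cur ++ [x]) xs
    else (if 1 < cur.length then [cur] else []) ++ pvRuns x [x] xs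

-- consecutive pairs of (a :: l)
def pvPairs (a : Int) : List Int → List (Int × Int)
  | [] => []
  | b :: bs => (a, b) :: pvPairs b bs

theorem pvZip_pairs (l : List Int) : ∀ a : Int, (a :: l).zip l = pvPairs a l := by
  induction l with
  | nil => intro a; rfl
  | cons b t ih => intro a; simp [pvPairs, List.zip_cons_cons, ih b]

theorem pvA_fold (xs : List Int) : ∀ (subs : List (List Int)) (cur : List Int) (prev : Int),
    cur.getLast? = some prev →
    pvFinA (xs.foldl pvStepA (subs, cur)) = subs ++ pvRuns prev cur xs := by
  induction xs with
  | nil =>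
    intro subs cur prev _; simp only [List.foldl_nil, pvRuns, pvFinA]
    split <;> simp
  | cons x xs ih =>
    intro subs cur prev hlast
    have hne : cur ≠ [] := by intro h; simp [h] at hlast
    have hget : PySem.List.pyGetD cur (-1) 0 = prev := by
      rw [PySem.List.pyGetD_neg_one cur 0 hne]
      exact Option.some.inj ((List.getLast?_eq_some_getLast hne).symm.trans hlast)
    simp only [List.foldl_cons, pvStepA, hget, pvRuns]
    by_cases hlt : prev < x
    · simp only [if_pos hlt]
      exact ih subs (cur ++ [x]) x (by simp)
    · simp only [if_neg hlt]
      by_cases hlen : 1 < cur.length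
      · simp only [if_pos hlen]
        rw [ih (subs ++ [cur]) [x] x (by simp)]
        simp
      · simp only [if_neg hlen]
        rw [ih subs [x] x (by simp)]
        simp

-- B's pipeline from break index j onwards equals pvRuns on the remaining suffix
theorem pvB_main (lst : List Int) : ∀ (m a j : Nat), a < j → j ≤ lst.length → lst.length - j = m →
    ((pvPairs (a : Int)
        (((PySem.List.pyRange (j : Int) (lst.length : Int) 1).filter
            (fun i => PySem.List.pyGetD lst i 0 ≤ PySem.List.pyGetD lst (i - 1) 0)) ++ [(lst.length : Int)])).filter
        (fun p => 1 < p.2 - p.1)).map (fun p => PySem.List.slice lst (some p.1) (some p.2))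
      = pvRuns (lst.getD (j - 1) 0) ((lst.drop a).take (j - a)) (lst.drop j) := by
  intro m
  induction m with
  | zero =>
    intro a j ha hj hm
    have hjn : j = lst.length := by omega
    subst hjn
    rw [PySem.List.pyRange_one_eq_nil (le_refl _), List.filter_nil, List.nil_append,
      List.drop_length]
    have hlen : ((lst.drop a).take (lst.length - a)).length = lst.length - a := by
      rw [List.length_take, List.length_drop]; omega
    simp only [pvPairs, pvRuns]
    by_cases hgt : (1 : Int) < (lst.length : Int) - (a : Int)
    · rw [List.filter_cons_of_pos (by simpa using hgt), List.filter_nil, if_pos (by omega)]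
      simp only [List.map_cons, List.map_nil, PySem.List.slice_natCast]
    · rw [List.filter_cons_of_neg (by simpa using hgt), List.filter_nil, List.map_nil,
        if_neg (by omega)]
  | succ m ih =>
    intro a j ha hj hm
    have hjlt : j < lst.length := by omega
    have hj1 : 1 ≤ j := by omega
    rw [PySem.List.pyRange_one_cons (by exact_mod_cast hjlt)]
    have hcast : (j : Int) - 1 = ((j - 1 : Nat) : Int) := by omega
    have hprev : PySem.List.pyGetD lst ((j : Int) - 1) 0 = lst.getD (j - 1) 0 := by
      rw [hcast, PySem.List.pyGetD_natCast]
    have hx : PySem.List.pyGetD lst (j : Int) 0 = lst.getD j 0 := by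
      rw [PySem.List.pyGetD_natCast]
    have hgetD : lst.getD j 0 = lst[j]'hjlt := List.getD_eq_getElem lst 0 hjlt
    have hdrop : lst.drop j = lst[j]'hjlt :: lst.drop (j + 1) := List.drop_eq_getElem_cons hjlt
    have hIH := ih a (j + 1) (by omega) (by omega) (by omega)
    have hIHj := ih j (j + 1) (by omega) (by omega) (by omega)
    simp only [Nat.cast_add, Nat.cast_one, Nat.add_sub_cancel] at hIH hIHj
    by_cases hbrk : lst.getD j 0 ≤ lst.getD (j - 1) 0
    · -- break at j: the current run is cut here, a fresh run starts at j
      rw [List.filter_cons_of_pos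
        (by rw [decide_eq_true_eq, hprev, hx]; exact hbrk)]
      rw [List.cons_append]
      simp only [pvPairs]
      rw [show (j + 1 - j : Nat) = 1 by omega] at hIHj
      have hcur1 : (lst.drop j).take 1 = [lst[j]'hjlt] := by rw [hdrop]; rfl
      rw [hcur1, hgetD] at hIHj
      rw [hdrop]
      simp only [pvRuns]
      rw [if_neg (by rw [hgetD] at hbrk; omega)]
      have hclen : ((lst.drop a).take (j - a)).length = j - a := by simp; omega
      by_cases hga : (1 : Int) < (j : Int) - (a : Int)
      · rw [List.filter_cons_of_pos (by simpa using hga), List.map_cons,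
          PySem.List.slice_natCast, hIHj, if_pos (by omega)]
        rfl
      · rw [List.filter_cons_of_neg (by simpa using hga), hIHj, if_neg (by omega)]
        rfl
    · -- no break at j: the run extends by lst[j]
      rw [List.filter_cons_of_neg
        (by rw [decide_eq_true_eq, hprev, hx]; exact hbrk)]
      have htake : (lst.drop a).take (j + 1 - a) = (lst.drop a).take (j - a) ++ [lst[j]'hjlt] := by
        have h1 : j + 1 - a = (j - a) + 1 := by omega
        rw [h1, List.take_add_one]
        have h2 : (lst.drop a)[j - a]? = some (lst[j]'hjlt) := by
          rw [List.getElem?_drop, List.getElem?_eq_getElem (by omega)]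
          congr 1; congr 1; omega
        rw [h2]; rfl
      rw [htake, hgetD] at hIH
      rw [hIH, hdrop]
      simp only [pvRuns]
      rw [if_pos (by rw [hgetD] at hbrk; omega)]

theorem find_monotonically_increasing_subsequences_spec : Claim_equal_find_monotonically_increasing_subsequences := by
  intro lst _ hpre
  unfold Spec_find_monotonically_increasing_subsequences
  unfold Pre_find_monotonically_increasing_subsequences at hpre
  obtain ⟨y, ys, rfl⟩ : ∃ y ys, lst = y :: ys := by
    cases lst with
    | nil => exact absurd rfl hpre
    | cons y ys => exact ⟨y, ys, rfl⟩
  -- A side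
  have hA : find_monotonically_increasing_subsequences (y :: ys) = pvRuns y [y] ys := by
    unfold find_monotonically_increasing_subsequences
    simp only [PySem.List.len_eq]
    rw [PySem.List.foldl_pyRange_pyGetD' (y :: ys) 0 pvStepA _ (by omega : (0:Int) ≤ 1)]
    simp only [Int.toNat_one, List.drop_one, List.tail_cons]
    rw [pvA_fold ys [] [PySem.List.pyGetD (y :: ys) 0 0] (PySem.List.pyGetD (y :: ys) 0 0) (by simp)]
    rw [PySem.List.pyGetD_zero_cons]
    simp
  -- B side
  have hB : find_monotonically_increasing_subsequences_alt (y :: ys) = pvRuns y [y] ys := by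
    unfold find_monotonically_increasing_subsequences_alt
    simp only [PySem.List.len_eq]
    rw [List.tail_cons, pvZip_pairs]
    have := pvB_main (y :: ys) ((y :: ys).length - 1) 0 1 (by omega) (by simp) rfl
    simp only [Nat.cast_zero, Nat.cast_one] at this
    rw [this]
    simp
  rw [hA, hB]
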